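-- pv_equiv track=rewrite | github.com/DANISH12344/numberplatedetectionbackend | src/Detection/detction.py | process_result
-- ===== SOURCE A (Python) =====
-- def process_result(res):
--     numbers = []
--     word_before_numbers = []
--     words_after_number = []
--     numb_found = False
--     for word in res:
--         try:
--             num = int(word)
--             numbers.append(word)
--             numb_found = True
--         except:
--             if (numb_found):
--                 words_after_number.append(word)
--             else:
--                 word_before_numbers.append(word)
--     final_number = ''.join(numbers)
--     words_bef = ''.join(word_before_numbers)
--     words_aft = ''.join(words_after_number)
--     final = ''
--     if not words_bef == '':
--         final += words_bef + '-'
--     if not final_number == '':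
--         final += final_number + '-'
--     if not words_aft == '':
--         final += words_aft
--     return final
-- ===== SOURCE B (Python) =====
-- def process_result(res):
--     def is_num(w):
--         try:
--             int(w)
--             return True
--         except:
--             return False
--     split = next((i for i, w in enumerate(res) if is_num(w)), len(res))
--     final_number = ''.join(w for w in res if is_num(w))
--     words_bef = ''.join(res[:split])
--     words_aft = ''.join(w for w in res[split:] if not is_num(w))
--     final = ''
--     if not words_bef == '':
--         final += words_bef + '-'
--     if not final_number == '':
--         final += final_number + '-'
--     if not words_aft == '':
--         final += words_aft
--     return final
-- ===== Notes on version B (the rewrite author's own statement) =====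
-- stated objective: alternative
-- what changed: Replaces A's flag-driven single pass carrying three accumulator lists with index location (first numeric word) plus slice/filter partition passes, reusing A's separator assembly.
import Mathlib
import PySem

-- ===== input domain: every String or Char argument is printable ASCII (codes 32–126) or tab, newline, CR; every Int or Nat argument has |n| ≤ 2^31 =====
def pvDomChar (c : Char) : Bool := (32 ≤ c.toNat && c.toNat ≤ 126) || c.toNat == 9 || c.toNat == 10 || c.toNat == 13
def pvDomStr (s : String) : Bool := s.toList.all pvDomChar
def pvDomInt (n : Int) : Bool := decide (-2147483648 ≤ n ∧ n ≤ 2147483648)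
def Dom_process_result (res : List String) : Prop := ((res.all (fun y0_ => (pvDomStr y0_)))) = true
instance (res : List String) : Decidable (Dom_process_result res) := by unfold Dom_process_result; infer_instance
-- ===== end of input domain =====

-- B restructures A's flag-driven single pass as split-point location plus slice/filter partitions; same cost, no behavioural change.

-- ===== PORT A =====
-- loop state: (numbers, word_before_numbers, words_after_number, numb_found)
def prLoopA (res : List String) : List String × List String × List String × Bool :=
  res.foldl (fun st word =>
    match PySem.Int.ofStr? word with   -- try: int(word) succeeds ↔ some _
    | some _ => (st.1 ++ [word], st.2.1, st.2.2.1, true)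
    | none =>
      if st.2.2.2 then (st.1, st.2.1, st.2.2.1 ++ [word], st.2.2.2)
      else (st.1, st.2.1 ++ [word], st.2.2.1, st.2.2.2)) ([], [], [], false)

def process_result (res : List String) : String :=
  let st := prLoopA res
  let final_number := PySem.Str.join "" st.1
  let words_bef := PySem.Str.join "" st.2.1
  let words_aft := PySem.Str.join "" st.2.2.1
  let final := ""
  let final := if ¬ (words_bef = "") then final ++ words_bef ++ "-" else final
  let final := if ¬ (final_number = "") then final ++ final_number ++ "-" else final
  let final := if ¬ (words_aft = "") then final ++ words_aft else final
  final

-- ===== PORT B =====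
def prIsNum (w : String) : Bool := (PySem.Int.ofStr? w).isSome

def process_result_alt (res : List String) : String :=
  let split := res.findIdx prIsNum      -- next((i for i,w in enumerate(res) if is_num(w)), len(res))
  let final_number := PySem.Str.join "" (res.filter prIsNum)
  let words_bef := PySem.Str.join "" (res.take split)    -- res[:split]; split ≥ 0, so take is exact
  let words_aft := PySem.Str.join "" ((res.drop split).filter (fun w => ! prIsNum w))  -- res[split:]
  let final := ""
  let final := if ¬ (words_bef = "") then final ++ words_bef ++ "-" else final
  let final := if ¬ (final_number = "") then final ++ final_number ++ "-" else final
  let final := if ¬ (words_aft = "") then final ++ words_aft else final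
  final

-- ===== PRECONDITION & SPEC =====
def Spec_process_result (res : List String) (out : String) : Prop := out = process_result_alt res
instance (res : List String) (out : String) : Decidable (Spec_process_result res out) := by unfold Spec_process_result; infer_instance

-- ===== CLAIM (what is proved, stated in full; the proofs are below) =====
def Claim_equal_process_result : Prop := ∀ (res : List String), Dom_process_result res → Spec_process_result res (process_result res)

-- ===== LEMMAS AND PROOFS =====

-- after the flag is set, numeric words go to numbers, the rest to words_after_number
lemma prLoopA_true (res ns bs asl : List String) :
    res.foldl (fun st word =>
      match PySem.Int.ofStr? word with
      | some _ => (st.1 ++ [word], st.2.1, st.2.2.1, true)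
      | none =>
        if st.2.2.2 then (st.1, st.2.1, st.2.2.1 ++ [word], st.2.2.2)
        else (st.1, st.2.1 ++ [word], st.2.2.1, st.2.2.2)) (ns, bs, asl, true)
    = (ns ++ res.filter prIsNum, bs, asl ++ res.filter (fun w => ! prIsNum w), true) := by
  induction res generalizing ns asl with
  | nil => simp
  | cons w t ih =>
    simp only [List.foldl_cons, List.filter_cons]
    cases h : PySem.Int.ofStr? w with
    | some v => simp [prIsNum, h, ih]
    | none => simp [prIsNum, h, ih]

-- before the flag is set: numbers collect numeric words, before collects up to the split point,
-- after collects non-numeric words past the split point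
lemma prLoopA_false (res ns bs asl : List String) :
    res.foldl (fun st word =>
      match PySem.Int.ofStr? word with
      | some _ => (st.1 ++ [word], st.2.1, st.2.2.1, true)
      | none =>
        if st.2.2.2 then (st.1, st.2.1, st.2.2.1 ++ [word], st.2.2.2)
        else (st.1, st.2.1 ++ [word], st.2.2.1, st.2.2.2)) (ns, bs, asl, false)
    = (ns ++ res.filter prIsNum,
       bs ++ res.take (res.findIdx prIsNum),
       asl ++ (res.drop (res.findIdx prIsNum)).filter (fun w => ! prIsNum w),
       res.any prIsNum) := by
  induction res generalizing ns bs with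
  | nil => simp
  | cons w t ih =>
    simp only [List.foldl_cons, List.filter_cons, List.findIdx_cons, List.any_cons]
    cases h : PySem.Int.ofStr? w with
    | some v =>
      simp [prIsNum, h, prLoopA_true]
    | none =>
      simp [prIsNum, h, ih]

theorem prLoopA_eq (res : List String) :
    prLoopA res = (res.filter prIsNum,
      res.take (res.findIdx prIsNum),
      (res.drop (res.findIdx prIsNum)).filter (fun w => ! prIsNum w),
      res.any prIsNum) := by
  simpa [prLoopA] using prLoopA_false res [] [] []

-- ===== VERDICT (by name: the statement is the Claim_ definition above) =====
theorem process_result_spec : Claim_equal_process_result := by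
  intro res _
  unfold Spec_process_result process_result process_result_alt
  rw [prLoopA_eq]
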